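-- pv_equiv track=rewrite | github.com/Gopinath-chinnadurai/Max-profit-algorithm | app.py | find_best_solutions
-- ===== SOURCE A (Python) =====
-- buildings = {
--     "T": {"name": "Theatre", "time": 5, "earning": 1500},
--     "P": {"name": "Pub", "time": 4, "earning": 1000},
--     "C": {"name": "Commercial Park", "time": 10, "earning": 2000}
-- }
--
-- def calculate_profit(sequence, total_time):
--     current_time = 0
--     total_profit = 0
--
--     for b in sequence:
--         current_time += buildings[b]["time"]
--
--         if current_time > total_time:
--             return 0
--
--         operational_time = total_time - current_time
--         total_profit += operational_time * buildings[b]["earning"]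
--
--     return total_profit
--
-- def find_best_solutions(total_time):
--     max_profit = 0
--     best_solutions = []
--
--     for t in range(0, total_time // 5 + 1):
--         for p in range(0, total_time // 4 + 1):
--             for c in range(0, total_time // 10 + 1):
--
--                 sequence = ["T"] * t + ["P"] * p + ["C"] * c
--                 profit = calculate_profit(sequence, total_time)
--
--                 if profit > max_profit:
--                     max_profit = profit
--                     best_solutions = [(t, p, c)]
--
--                 elif profit == max_profit and profit > 0:
--                     best_solutions.append((t, p, c))
--
--     return best_solutions, max_profit
-- ===== SOURCE B (Python) =====
-- def find_best_solutions(total_time):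
--     # Closed-form profit per (t, p, c): no sequence is built and rescanned.
--     max_profit = 0
--     best_solutions = []
--     for t in range(0, total_time // 5 + 1):
--         for p in range(0, total_time // 4 + 1):
--             for c in range(0, total_time // 10 + 1):
--                 if 5 * t + 4 * p + 10 * c > total_time:
--                     profit = 0
--                 else:
--                     profit = (1500 * (t * total_time - 5 * t * (t + 1) // 2)
--                               + 1000 * (p * (total_time - 5 * t) - 4 * p * (p + 1) // 2)
--                               + 2000 * (c * (total_time - 5 * t - 4 * p) - 10 * c * (c + 1) // 2))
--                 if profit > max_profit:
--                     max_profit = profit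
--                     best_solutions = [(t, p, c)]
--                 elif profit == max_profit and profit > 0:
--                     best_solutions.append((t, p, c))
--     return best_solutions, max_profit
-- ===== Notes on version B (the rewrite author's own statement) =====
-- stated objective: faster
-- what changed: The inner pass that builds the sequence list and rescans it (calculate_profit) is replaced by a closed-form arithmetic-series profit formula evaluated directly per (t,p,c), dropping a factor of n from the loop nest.
import Mathlib
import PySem

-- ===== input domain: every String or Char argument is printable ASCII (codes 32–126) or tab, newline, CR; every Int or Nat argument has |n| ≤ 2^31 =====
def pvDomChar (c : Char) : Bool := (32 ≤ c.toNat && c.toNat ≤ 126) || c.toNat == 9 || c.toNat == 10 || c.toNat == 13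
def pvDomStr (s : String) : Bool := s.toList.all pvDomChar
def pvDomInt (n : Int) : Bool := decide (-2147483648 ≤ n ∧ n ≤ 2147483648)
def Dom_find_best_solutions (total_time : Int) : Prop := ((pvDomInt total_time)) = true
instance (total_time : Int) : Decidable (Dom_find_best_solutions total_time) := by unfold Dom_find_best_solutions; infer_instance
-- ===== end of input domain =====

-- B replaces A's per-triple sequence build + rescan with a closed-form arithmetic-series
-- profit formula per (t, p, c) (objective: faster, one loop level of work removed).

-- ===== PORT A =====
-- buildings[b]["time"] / ["earning"] for the three keys used
def pvTime (b : String) : Int := if b = "T" then 5 else if b = "P" then 4 else 10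
def pvEarn (b : String) : Int := if b = "T" then 1500 else if b = "P" then 1000 else 2000

-- literal port of calculate_profit (the early 'return 0' becomes the if-branch)
def calcProfit : List String → Int → Int → Int → Int
  | [], _, _, total_profit => total_profit
  | b :: rest, total_time, current_time, total_profit =>
    let ct := current_time + pvTime b
    if ct > total_time then 0
    else calcProfit rest total_time ct (total_profit + (total_time - ct) * pvEarn b)

def find_best_solutions (total_time : Int) : (List (Int × Int × Int)) × Int :=
  (PySem.List.pyRange 0 (PySem.Int.floordiv total_time 5 + 1) 1).foldl (fun st t =>
    (PySem.List.pyRange 0 (PySem.Int.floordiv total_time 4 + 1) 1).foldl (fun st p =>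
      (PySem.List.pyRange 0 (PySem.Int.floordiv total_time 10 + 1) 1).foldl (fun st c =>
        let sequence := List.replicate t.toNat "T" ++ List.replicate p.toNat "P" ++
                        List.replicate c.toNat "C"
        let profit := calcProfit sequence total_time 0 0
        if profit > st.2 then ([(t, p, c)], profit)
        else if profit = st.2 ∧ profit > 0 then (st.1 ++ [(t, p, c)], st.2)
        else st) st) st)
    (([] : List (Int × Int × Int)), (0 : Int))

-- ===== PORT B =====
def pvProfitFormula (t p c total_time : Int) : Int :=
  if 5 * t + 4 * p + 10 * c > total_time then 0
  else 1500 * (t * total_time - PySem.Int.floordiv (5 * t * (t + 1)) 2)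
     + 1000 * (p * (total_time - 5 * t) - PySem.Int.floordiv (4 * p * (p + 1)) 2)
     + 2000 * (c * (total_time - 5 * t - 4 * p) - PySem.Int.floordiv (10 * c * (c + 1)) 2)

def find_best_solutions_alt (total_time : Int) : (List (Int × Int × Int)) × Int :=
  (PySem.List.pyRange 0 (PySem.Int.floordiv total_time 5 + 1) 1).foldl (fun st t =>
    (PySem.List.pyRange 0 (PySem.Int.floordiv total_time 4 + 1) 1).foldl (fun st p =>
      (PySem.List.pyRange 0 (PySem.Int.floordiv total_time 10 + 1) 1).foldl (fun st c =>
        let profit := pvProfitFormula t p c total_time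
        if profit > st.2 then ([(t, p, c)], profit)
        else if profit = st.2 ∧ profit > 0 then (st.1 ++ [(t, p, c)], st.2)
        else st) st) st)
    (([] : List (Int × Int × Int)), (0 : Int))

-- ===== PRECONDITION & SPEC =====
def Spec_find_best_solutions (total_time : Int) (out : (List (Int × Int × Int)) × Int) : Prop := out = find_best_solutions_alt total_time
instance (total_time : Int) (out : (List (Int × Int × Int)) × Int) : Decidable (Spec_find_best_solutions total_time out) := by unfold Spec_find_best_solutions; infer_instance

-- ===== CLAIM (what is proved, stated in full; the proofs are below) =====
def Claim_equal_find_best_solutions : Prop := ∀ (total_time : Int), Dom_find_best_solutions total_time → Spec_find_best_solutions total_time (find_best_solutions total_time)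

-- ===== LEMMAS AND PROOFS =====

def segTime : List String → Int
  | [] => 0
  | b :: rest => pvTime b + segTime rest

def segProfit : List String → Int → Int → Int
  | [], _, _ => 0
  | b :: rest, total, ct => (total - (ct + pvTime b)) * pvEarn b + segProfit rest total (ct + pvTime b)

def tri (n : Nat) : Int := ((n * (n + 1) / 2 : Nat) : Int)

lemma pvTime_pos (b : String) : 0 < pvTime b := by
  unfold pvTime; split_ifs <;> norm_num

lemma segTime_nonneg (l : List String) : 0 ≤ segTime l := by
  induction l with
  | nil => simp [segTime]
  | cons b rest ih => have := pvTime_pos b; unfold segTime; omega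

lemma calc_spec (l : List String) : ∀ (total ct tp : Int),
    calcProfit l total ct tp =
      if l ≠ [] ∧ total < ct + segTime l then 0 else tp + segProfit l total ct := by
  induction l with
  | nil => intro total ct tp; simp [calcProfit, segProfit]
  | cons b rest ih =>
    intro total ct tp
    have hpos := pvTime_pos b
    have hrest := segTime_nonneg rest
    by_cases h : ct + pvTime b > total
    · have hc : total < ct + segTime (b :: rest) := by simp [segTime]; omega
      simp [calcProfit, h, hc]
    · have hle : ¬ (ct + pvTime b > total) := h
      rw [show calcProfit (b :: rest) total ct tp =
            calcProfit rest total (ct + pvTime b) (tp + (total - (ct + pvTime b)) * pvEarn b) by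
            simp [calcProfit, hle]]
      rw [ih]
      rcases rest with _ | ⟨x, xs⟩
      · simp [segProfit, segTime]
        intro h'; omega
      · have hiff : (total < ct + pvTime b + segTime (x :: xs)) ↔
            (total < ct + segTime (b :: (x :: xs))) := by simp [segTime]; omega
        by_cases h2 : total < ct + pvTime b + segTime (x :: xs)
        · simp [h2, hiff.mp h2]
        · have h3 : ¬ total < ct + segTime (b :: (x :: xs)) := fun hc => h2 (hiff.mpr hc)
          simp [h2, h3, segProfit]; ring

lemma two_tri (n : Nat) : 2 * tri n = (n : Int) * ((n : Int) + 1) := by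
  have h : 2 ∣ n * (n + 1) := (Nat.even_mul_succ_self n).two_dvd
  have h2 : n * (n + 1) / 2 * 2 = n * (n + 1) := Nat.div_mul_cancel h
  unfold tri
  have h3 : ((n * (n + 1) / 2 : Nat) : Int) * 2 = ((n * (n + 1) : Nat) : Int) := by
    exact_mod_cast congrArg (fun m : Nat => (m : Int)) h2
  have h4 : ((n * (n + 1) : Nat) : Int) = (n : Int) * ((n : Int) + 1) := by push_cast; ring
  linarith

lemma tri_succ (n : Nat) : tri (n + 1) = tri n + ((n : Int) + 1) := by
  have h1 := two_tri (n + 1)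
  have h2 := two_tri n
  push_cast at h1
  nlinarith [h1, h2]

lemma segTime_replicate (b : String) (n : Nat) (rest : List String) :
    segTime (List.replicate n b ++ rest) = (n : Int) * pvTime b + segTime rest := by
  induction n with
  | zero => simp [segTime]
  | succ m ih => simp [List.replicate_succ, segTime, ih]; ring

lemma segProfit_replicate (b : String) : ∀ (n : Nat) (rest : List String) (total ct : Int),
    segProfit (List.replicate n b ++ rest) total ct =
      pvEarn b * ((n : Int) * (total - ct)) - pvEarn b * pvTime b * tri n +
        segProfit rest total (ct + (n : Int) * pvTime b) := by
  intro n
  induction n with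
  | zero => intro rest total ct; simp [tri]
  | succ m ih =>
    intro rest total ct
    rw [List.replicate_succ, List.cons_append]
    show (total - (ct + pvTime b)) * pvEarn b +
        segProfit (List.replicate m b ++ rest) total (ct + pvTime b) = _
    rw [ih]
    have harg : ct + pvTime b + (m : Int) * pvTime b = ct + ((m + 1 : Nat) : Int) * pvTime b := by
      push_cast; ring
    rw [harg, tri_succ]
    push_cast
    ring

lemma floordiv_k_tri (k n : Nat) :
    PySem.Int.floordiv ((k : Int) * (n : Int) * ((n : Int) + 1)) 2 = (k : Int) * tri n := by
  have hdvd : 2 ∣ n * (n + 1) := (Nat.even_mul_succ_self n).two_dvd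
  have harg : (k : Int) * (n : Int) * ((n : Int) + 1) = ((k * (n * (n + 1)) : Nat) : Int) := by
    push_cast; ring
  rw [harg]
  rw [show PySem.Int.floordiv ((k * (n * (n + 1)) : Nat) : Int) 2 =
        PySem.Int.floordiv ((k * (n * (n + 1)) : Nat) : Int) ((2 : Nat) : Int) by norm_num]
  rw [PySem.Int.floordiv_natCast]
  rw [Nat.mul_div_assoc k hdvd]
  unfold tri
  push_cast
  ring

lemma profit_eq (total : Int) (t p c : Nat) :
    calcProfit (List.replicate t "T" ++ List.replicate p "P" ++ List.replicate c "C") total 0 0 =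
      pvProfitFormula (t : Int) (p : Int) (c : Int) total := by
  have hT : pvTime "T" = 5 := by decide
  have hP : pvTime "P" = 4 := by decide
  have hC : pvTime "C" = 10 := by decide
  have heT : pvEarn "T" = 1500 := by decide
  have heP : pvEarn "P" = 1000 := by decide
  have heC : pvEarn "C" = 2000 := by decide
  have hnilC : List.replicate c "C" = List.replicate c "C" ++ [] := (List.append_nil _).symm
  have hsegT : segTime (List.replicate t "T" ++ List.replicate p "P" ++ List.replicate c "C") =
      5 * (t : Int) + 4 * (p : Int) + 10 * (c : Int) := by
    rw [List.append_assoc, hnilC, segTime_replicate, segTime_replicate, segTime_replicate]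
    simp [segTime, hT, hP, hC]; ring
  have hsegP : segProfit (List.replicate t "T" ++ List.replicate p "P" ++ List.replicate c "C")
      total 0 =
      1500 * ((t : Int) * total) - 7500 * tri t
      + 1000 * ((p : Int) * (total - 5 * (t : Int))) - 4000 * tri p
      + 2000 * ((c : Int) * (total - 5 * (t : Int) - 4 * (p : Int))) - 20000 * tri c := by
    rw [List.append_assoc, hnilC, segProfit_replicate, segProfit_replicate, segProfit_replicate]
    simp [segProfit, hT, hP, hC, heT, heP, heC]
    ring
  have hd5 := floordiv_k_tri 5 t
  have hd4 := floordiv_k_tri 4 p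
  have hd10 := floordiv_k_tri 10 c
  push_cast at hd5 hd4 hd10
  rw [calc_spec, hsegT, hsegP]
  unfold pvProfitFormula
  split_ifs with h1 h2 h2
  · rfl
  · exact absurd h1.2 (by omega)
  · -- sequence is empty here: all counts are zero
    have hseq : List.replicate t "T" ++ List.replicate p "P" ++ List.replicate c "C" = [] := by
      by_contra hne
      exact h1 ⟨hne, by omega⟩
    have ht0 : t = 0 := by
      have := congrArg List.length hseq; simp at this; omega
    have hp0 : p = 0 := by
      have := congrArg List.length hseq; simp at this; omega
    have hc0 : c = 0 := by
      have := congrArg List.length hseq; simp at this; omega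
    subst ht0; subst hp0; subst hc0
    norm_num [tri]
  · rw [hd5, hd4, hd10]
    ring

lemma profit_eq' (total t p c : Int) (ht : 0 ≤ t) (hp : 0 ≤ p) (hc : 0 ≤ c) :
    calcProfit (List.replicate t.toNat "T" ++ List.replicate p.toNat "P" ++
        List.replicate c.toNat "C") total 0 0 = pvProfitFormula t p c total := by
  have := profit_eq total t.toNat p.toNat c.toNat
  rwa [Int.toNat_of_nonneg ht, Int.toNat_of_nonneg hp, Int.toNat_of_nonneg hc] at this

-- ===== VERDICT (by name: the statement is the Claim_ definition above) =====
theorem find_best_solutions_spec : Claim_equal_find_best_solutions := by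
  intro total_time _
  unfold Spec_find_best_solutions find_best_solutions find_best_solutions_alt
  apply PySem.List.foldl_congr_mem
  intro st t htmem
  have ht : 0 ≤ t := ((PySem.List.mem_pyRange_one).mp htmem).1
  apply PySem.List.foldl_congr_mem
  intro st p hpmem
  have hp : 0 ≤ p := ((PySem.List.mem_pyRange_one).mp hpmem).1
  apply PySem.List.foldl_congr_mem
  intro st c hcmem
  have hc : 0 ≤ c := ((PySem.List.mem_pyRange_one).mp hcmem).1
  simp only [profit_eq' total_time t p c ht hp hc]
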